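-- pv_equiv track=rewrite | github.com/Shivi127/InformationRetrieval | invertedindex.py | undelta
-- ===== SOURCE A (Python) =====
-- def undelta(arr):
-- #     Undothe delta
-- # Have to overwrite too
--     temp = arr
--     result = []
--
--     prev_doc  = 0
--     while(len(temp)>0):
--
--         numberofterms = temp[1]
--         positions = decode(temp[2:numberofterms+2])
--         result.append(prev_doc+temp[0])
--         result.append(numberofterms)
--         result.extend(positions)
--         prev_doc += temp[0]
--         temp = temp[numberofterms+2:]
--
--     return result
--
-- def decode(decodeme):
--     prev = 0
--     for i, v in enumerate(decodeme):
--         current = v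
--         decodeme[i] += prev
--         prev = current
--     return decodeme
-- ===== SOURCE B (Python) =====
-- def undelta(arr):
--     # Phase 1: parse the array into chunk records (doc_delta, numberofterms, raw_positions)
--     # with a single index pointer (no repeated suffix copying).
--     chunks = []
--     i = 0
--     n = len(arr)
--     while i < n:
--         k = arr[i + 1]
--         chunks.append((arr[i], k, arr[i + 2:i + 2 + k]))
--         i += k + 2
--     # Phase 2: emit, keeping a running doc-id total; each position is paired with its
--     # left neighbour (the original module's decode adds only the previous raw value).
--     out = []
--     doc = 0
--     for d, k, pos in chunks:
--         doc += d
--         out.append(doc)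
--         out.append(k)
--         out.extend(x + y for x, y in zip(pos, [0] + pos))
--     return out
-- ===== Notes on version B (the rewrite author's own statement) =====
-- stated objective: alternative
-- what changed: A repeatedly re-slices the whole remaining array (temp = temp[k+2:]) and decodes by mutating a slice in place; B makes one parse pass with an index pointer collecting chunk records and one emit pass with a running doc total, decoding positions by zipping each position list with its shifted copy.
import Mathlib
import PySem

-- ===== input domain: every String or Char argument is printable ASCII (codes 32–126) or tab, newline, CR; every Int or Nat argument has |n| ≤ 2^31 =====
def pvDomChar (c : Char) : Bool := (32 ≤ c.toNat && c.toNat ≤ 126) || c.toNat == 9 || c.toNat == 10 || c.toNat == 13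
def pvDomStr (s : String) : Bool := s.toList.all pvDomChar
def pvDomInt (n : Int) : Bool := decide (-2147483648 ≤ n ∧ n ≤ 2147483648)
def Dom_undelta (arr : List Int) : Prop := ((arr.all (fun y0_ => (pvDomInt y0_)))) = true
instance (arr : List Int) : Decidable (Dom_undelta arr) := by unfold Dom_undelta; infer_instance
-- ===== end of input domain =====

-- B replaces A's repeated suffix-copying while loop by a parse pass (index pointer) plus an
-- emit pass over the chunk records; objective: alternative decomposition. Return value only:
-- A never mutates arr (decode mutates fresh slices), B does not either.

-- ===== PORT A =====
-- decode(decodeme): in-place loop 'decodeme[i] += prev; prev = current' — ported as the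
-- structural recursion carrying 'prev' (each cell becomes v + previous ORIGINAL value).
def pyDecode (prev : Int) : List Int → List Int
  | [] => []
  | v :: rest => (v + prev) :: pyDecode v rest

-- the while loop of A over (temp, prev_doc).  temp[numberofterms+2:] is ported as
-- rest.drop numberofterms.toNat, which is Python's slice for numberofterms ≥ 0 (Pre_);
-- a one-element temp is where Python raises IndexError reading the chunk length (excluded by Pre_).
def undeltaGo : List Int → Int → List Int
  | [], _ => []
  | [_], _ => []   -- Python: IndexError reading the chunk length; excluded by Pre_undelta
  | t0 :: t1 :: rest, prev_doc =>
      let numberofterms := t1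
      let positions := pyDecode 0 (PySem.List.slice (t0 :: t1 :: rest) (some 2) (some (numberofterms + 2)))
      (prev_doc + t0) :: numberofterms :: positions ++ undeltaGo (rest.drop numberofterms.toNat) (prev_doc + t0)
termination_by temp => temp.length
decreasing_by simp; omega

def undelta (arr : List Int) : List Int := undeltaGo arr 0

-- ===== PORT B =====
-- Phase 1 of Source B: while i < n, read arr[i], arr[i+1], slice the positions, advance i by k+2.
-- The fuel argument (arr.length + 1) only makes the loop total in Lean (inside Pre_ the index
-- strictly advances by ≥ 2 each step, so the fuel never runs out).
def parseGo : Nat → List Int → Int → List (Int × Int × List Int)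
  | 0, _, _ => []
  | fuel + 1, arr, i =>
      if i < (arr.length : Int) then
        match PySem.List.pyGet? arr i, PySem.List.pyGet? arr (i + 1) with
        | some d, some k =>
            (d, k, PySem.List.slice arr (some (i + 2)) (some (i + 2 + k))) :: parseGo fuel arr (i + k + 2)
        | _, _ => []   -- Python: IndexError; excluded by Pre_undelta
      else []

-- Phase 2 of Source B: fold over the chunk records with state (out, doc);
-- zip(pos, [0] + pos) with x + y is zipWith.
def undelta_alt (arr : List Int) : List Int :=
  let chunks := parseGo (arr.length + 1) arr 0
  (chunks.foldl
    (fun (acc : List Int × Int) c =>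
      (acc.1 ++ (acc.2 + c.1) :: c.2.1 :: List.zipWith (fun x y => x + y) c.2.2 (0 :: c.2.2),
       acc.2 + c.1))
    ([], 0)).1

-- ===== PRECONDITION & SPEC =====
-- shape grammar: arr is a sequence of chunks [doc_delta, k, <k position slots>] with k ≥ 0
-- (the last chunk's positions may be truncated: drop past the end is []).
inductive ChunkWF : List Int → Prop
  | nil : ChunkWF []
  | chunk (d k : Int) (rest : List Int) :
      0 ≤ k → ChunkWF (rest.drop k.toNat) → ChunkWF (d :: k :: rest)

-- decision procedure for ChunkWF, structural on the bound (length suffices: each chunk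
-- consumes at least two elements); proved equivalent to ChunkWF in chunkWF_iff below.
def preChunksGo : List Int → Nat → Bool
  | [], _ => true
  | [_], _ => false
  | _ :: _ :: _, 0 => false
  | _ :: k :: rest, fuel + 1 => decide (0 ≤ k) && preChunksGo (rest.drop k.toNat) fuel

-- the fuel of preChunksGo is irrelevant once it covers the list's length
theorem preChunksGo_congr (f1 : Nat) : ∀ (f2 : Nat) (l : List Int), l.length ≤ f1 → l.length ≤ f2 →
    preChunksGo l f1 = preChunksGo l f2 := by
  induction f1 with
  | zero =>
      intro f2 l h1 _
      have : l = [] := List.eq_nil_of_length_eq_zero (by omega)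
      subst this
      cases f2 <;> rfl
  | succ f1 ih =>
      intro f2 l h1 h2
      cases l with
      | nil => cases f2 <;> simp [preChunksGo]
      | cons d t =>
          cases t with
          | nil => cases f2 <;> simp [preChunksGo]
          | cons k rest =>
              cases f2 with
              | zero => simp at h2
              | succ f2 =>
                  simp only [preChunksGo]
                  congr 1
                  exact ih f2 (rest.drop k.toNat) (by simp at h1 ⊢; omega) (by simp at h2 ⊢; omega)

theorem preChunksGo_of_chunkWF {l : List Int} (h : ChunkWF l) : preChunksGo l l.length = true := by
  induction h with
  | nil => rfl
  | chunk d k rest hk _ ih =>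
      simp only [List.length_cons, preChunksGo, Bool.and_eq_true, decide_eq_true_eq]
      refine ⟨hk, ?_⟩
      rw [preChunksGo_congr (rest.length + 1) (rest.drop k.toNat).length _ (by simp; omega) (le_refl _)]
      exact ih

theorem chunkWF_of_preChunksGo (n : Nat) : ∀ (l : List Int), l.length ≤ n →
    preChunksGo l l.length = true → ChunkWF l := by
  induction n with
  | zero =>
      intro l h1 _
      have : l = [] := List.eq_nil_of_length_eq_zero (by omega)
      rw [this]; exact ChunkWF.nil
  | succ n ih =>
      intro l h1 hp
      cases l with
      | nil => exact ChunkWF.nil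
      | cons d t =>
          cases t with
          | nil => simp [preChunksGo] at hp
          | cons k rest =>
              simp only [List.length_cons, preChunksGo, Bool.and_eq_true, decide_eq_true_eq] at hp
              obtain ⟨hk, hp⟩ := hp
              refine ChunkWF.chunk d k rest hk (ih _ (by simp at h1 ⊢; omega) ?_)
              rw [preChunksGo_congr (rest.drop k.toNat).length (rest.length + 1) _ (le_refl _) (by simp; omega)]
              exact hp

theorem chunkWF_iff (l : List Int) : ChunkWF l ↔ preChunksGo l l.length = true :=
  ⟨preChunksGo_of_chunkWF, chunkWF_of_preChunksGo l.length l (le_refl _)⟩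

-- Pre_ excludes exactly (a) arrays whose chunk structure leaves a single trailing element,
-- where A raises IndexError reading the chunk length, and (b) negative chunk counts, where A's behaviour is
-- an accident of Python's negative-slice wraparound (A diverges, raises, or returns
-- wraparound-dependent values; B may diverge there).
def Pre_undelta (arr : List Int) : Prop := ChunkWF arr
instance (arr : List Int) : Decidable (Pre_undelta arr) := by
  unfold Pre_undelta; exact decidable_of_iff _ (chunkWF_iff arr).symm

def pvWitness_undelta : List Int := [5, 3, 1, 2, 3, 2, 2, 4, 5]

def Spec_undelta (arr : List Int) (out : List Int) : Prop := out = undelta_alt arr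
instance (arr : List Int) (out : List Int) : Decidable (Spec_undelta arr out) := by unfold Spec_undelta; infer_instance

-- ===== CLAIM (what is proved, stated in full; the proofs are below) =====
def Claim_equal_undelta : Prop := ∀ (arr : List Int), Dom_undelta arr → Pre_undelta arr → Spec_undelta arr (undelta arr)

-- ===== LEMMAS AND PROOFS =====

-- zip-with-shifted-copy computes exactly A's decode recursion
theorem zipWith_shift_eq_pyDecode (pos : List Int) (p : Int) :
    List.zipWith (fun x y => x + y) pos (p :: pos) = pyDecode p pos := by
  induction pos generalizing p with
  | nil => rfl
  | cons v rest ih => simp [pyDecode, List.zipWith, ← ih]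

-- folding B's emit step equals the recursive emission, with the accumulator pulled out front
def emitRec : List (Int × Int × List Int) → Int → List Int
  | [], _ => []
  | (d, k, pos) :: cs, doc =>
      (doc + d) :: k :: List.zipWith (fun x y => x + y) pos (0 :: pos) ++ emitRec cs (doc + d)

theorem foldl_emit (chunks : List (Int × Int × List Int)) (acc : List Int) (doc : Int) :
    (chunks.foldl
      (fun (a : List Int × Int) c =>
        (a.1 ++ (a.2 + c.1) :: c.2.1 :: List.zipWith (fun x y => x + y) c.2.2 (0 :: c.2.2),
         a.2 + c.1))
      (acc, doc)).1 = acc ++ emitRec chunks doc := by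
  induction chunks generalizing acc doc with
  | nil => simp [emitRec]
  | cons c cs ih =>
      obtain ⟨d, k, pos⟩ := c
      simp [List.foldl, emitRec, ih, List.append_assoc]

-- the core equivalence: B's parse-then-emit on the suffix arr.drop i equals A's loop there
theorem parse_emit_eq (fuel : Nat) (arr : List Int) (i : Nat) (doc : Int)
    (hi : i ≤ arr.length) (hfuel : arr.length + 1 - i ≤ fuel)
    (hpre : preChunksGo (arr.drop i) (arr.drop i).length = true) :
    emitRec (parseGo fuel arr (i : Int)) doc = undeltaGo (arr.drop i) doc := by
  induction fuel generalizing i doc with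
  | zero => omega
  | succ fuel ih =>
      by_cases hlt : i < arr.length
      · -- arr.drop i = d :: k :: rest'
        have hne : arr.drop i ≠ [] := by
          simp [List.drop_eq_nil_iff]; omega
        obtain ⟨d, tail, hdt⟩ := List.exists_cons_of_ne_nil hne
        cases tail with
        | nil =>
            exfalso
            rw [hdt] at hpre
            simp [preChunksGo] at hpre
        | cons k rest' =>
            rw [hdt] at hpre
            simp only [List.length_cons, preChunksGo, Bool.and_eq_true, decide_eq_true_eq] at hpre
            obtain ⟨hk, hpre'⟩ := hpre
            have hpre' : preChunksGo (rest'.drop k.toNat) (rest'.drop k.toNat).length = true := by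
              rw [preChunksGo_congr _ (rest'.length + 1) _ (le_refl _) (by simp; omega)]
              exact hpre'
            have hd : arr[i]? = some d := by
              have h : (List.drop i arr)[0]? = arr[i + 0]? := List.getElem?_drop
              rw [hdt] at h
              simpa using h.symm
            have hk1 : arr[i + 1]? = some k := by
              have h : (List.drop i arr)[1]? = arr[i + 1]? := List.getElem?_drop
              rw [hdt] at h
              simpa using h.symm
            have hrest : List.drop (i + 2) arr = rest' := by
              have h : List.drop 2 (List.drop i arr) = List.drop (i + 2) arr := List.drop_drop
              rw [hdt] at h
              rw [← h]
              simp
            -- unfold parseGo one step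
            rw [parseGo]
            have hg1 : PySem.List.pyGet? arr (i : Int) = some d := by
              rw [PySem.List.pyGet?_natCast]; exact hd
            have hg2 : PySem.List.pyGet? arr ((i : Int) + 1) = some k := by
              have : ((i : Int) + 1) = ((i + 1 : Nat) : Int) := by push_cast; ring
              rw [this, PySem.List.pyGet?_natCast]; exact hk1
            rw [if_pos (by exact_mod_cast hlt), hg1, hg2]
            -- unfold undeltaGo one step
            rw [hdt, undeltaGo]
            -- the two position slices agree
            have hsliceA : PySem.List.slice (d :: k :: rest') (some 2) (some (k + 2)) =
                rest'.take k.toNat := by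
              rw [PySem.List.slice_toNat _ (by norm_num) (by omega)]
              have h2 : (2 : Int).toNat = 2 := rfl
              have hkk : (k + 2).toNat - (2 : Int).toNat = k.toNat := by omega
              rw [hkk]
              simp
            have hsliceB : PySem.List.slice arr (some ((i : Int) + 2)) (some ((i : Int) + 2 + k)) =
                rest'.take k.toNat := by
              rw [PySem.List.slice_toNat _ (by omega) (by omega)]
              rw [show ((i : Int) + 2).toNat = i + 2 by omega]
              rw [show ((i : Int) + 2 + k).toNat - (i + 2) = k.toNat by omega]
              rw [hrest]
            rw [emitRec, hsliceA, hsliceB, zipWith_shift_eq_pyDecode]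
            -- recursion: next index
            have hdrop : rest'.drop k.toNat = arr.drop (i + 2 + k.toNat) := by
              rw [← hrest, List.drop_drop]
            by_cases hov : i + 2 + k.toNat ≤ arr.length
            · have hcast : (i : Int) + k + 2 = ((i + 2 + k.toNat : Nat) : Int) := by
                push_cast; omega
              rw [hcast, ih (i + 2 + k.toNat) (doc + d) hov (by omega)
                    (by rw [← hdrop]; exact hpre')]
              rw [hdrop]
            · -- overshoot: both sides emit nothing further
              have hnil : rest'.drop k.toNat = [] := by
                rw [hdrop, List.drop_eq_nil_iff]; omega
              rw [hnil]
              have : ¬ ((i : Int) + k + 2 < (arr.length : Int)) := by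
                omega
              cases fuel with
              | zero => simp [parseGo, emitRec, undeltaGo]
              | succ f => rw [parseGo, if_neg this]; simp [emitRec, undeltaGo]
      · -- i = arr.length: loop over
        have hi' : i = arr.length := by omega
        have : ¬ ((i : Int) < (arr.length : Int)) := by exact_mod_cast not_lt.mpr (le_of_eq hi'.symm)
        rw [parseGo, if_neg this]
        rw [List.drop_eq_nil_iff.mpr (by omega)]
        simp [emitRec, undeltaGo]

-- ===== VERDICT (by name: the statement is the Claim_ definition above) =====
theorem undelta_spec : Claim_equal_undelta := by
  intro arr _ hpre
  unfold Spec_undelta undelta undelta_alt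
  rw [foldl_emit]
  have hb : preChunksGo arr arr.length = true := (chunkWF_iff arr).mp hpre
  have h := parse_emit_eq (arr.length + 1) arr 0 0 (by omega) (by omega) (by simpa using hb)
  simpa using h.symm
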